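-- pv_equiv track=rewrite | github.com/IzaakWN/Delphes | python/HHEventSelection.py | isInCategory
-- ===== SOURCE A (Python) =====
-- def isInCategory(category, categoryData):
--     """Check if the event enters category X, given the tuple computed by eventCategory."""
--
--     if category == 0:
-- #        return categoryData[7]
-- #        #      > signal
--         return isInCategory(1, categoryData)
--
--     if category == 1:
--         return categoryData[0] and categoryData[2] and categoryData[7]
--         #      > lepton            > 4 jets            > signal
-- #        return isInCategory(3, categoryData)
--
--     if category == 2:
--         return categoryData[0] and categoryData[2] and categoryData[4] and categoryData[7]
--         #      > lepton            > 4 jets            > 2 b-jets          > signal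
-- #        return isInCategory(3, categoryData)
--
--     if category == 3:
--         return categoryData[1] and categoryData[2] and categoryData[4] and categoryData[7]
--         #      > exact 1 lepton    > 4 jets            > 2 b-jets        > signal
--
--     if category == 3:
--         return categoryData[1] and categoryData[2] and categoryData[4] and categoryData[5] and categoryData[7]
--         #      > exact 1 lepton    > 4 jets            > 2 b-jets          > max 6 jets        > signal
--
--     if category == 4:
--         return categoryData[1] and categoryData[2] and categoryData[4] and categoryData[5] and categoryData[6] and categoryData[7]
--         #      > exact 1 lepton    > 4 jets            > 2 b-jets          > max 6 jets        > MET               > signal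
--
--     else:
--         return False
-- ===== SOURCE B (Python) =====
-- # B inverts the traversal: one pass over categoryData collects the set of FAILED
-- # cut indices, then a set-disjointness test against the category's required set.
-- _REQUIRED = {
--     0: frozenset((0, 2, 7)),
--     1: frozenset((0, 2, 7)),
--     2: frozenset((0, 2, 4, 7)),
--     3: frozenset((1, 2, 4, 7)),
--     4: frozenset((1, 2, 4, 5, 6, 7)),
-- }
--
-- def isInCategory(category, categoryData):
--     req = _REQUIRED.get(category)
--     if req is None:
--         return False
--     failed = {i for i, passed in enumerate(categoryData) if not passed}
--     return req.isdisjoint(failed)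
-- ===== Notes on version B (the rewrite author's own statement) =====
-- stated objective: alternative
-- what changed: Instead of reading the data at each required index through an and-chain (with a category-0 recursion and a dead duplicate branch), B makes one pass over categoryData collecting the set of failed cut indices and answers by a set-disjointness test against a per-category required-index set.
import Mathlib
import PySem

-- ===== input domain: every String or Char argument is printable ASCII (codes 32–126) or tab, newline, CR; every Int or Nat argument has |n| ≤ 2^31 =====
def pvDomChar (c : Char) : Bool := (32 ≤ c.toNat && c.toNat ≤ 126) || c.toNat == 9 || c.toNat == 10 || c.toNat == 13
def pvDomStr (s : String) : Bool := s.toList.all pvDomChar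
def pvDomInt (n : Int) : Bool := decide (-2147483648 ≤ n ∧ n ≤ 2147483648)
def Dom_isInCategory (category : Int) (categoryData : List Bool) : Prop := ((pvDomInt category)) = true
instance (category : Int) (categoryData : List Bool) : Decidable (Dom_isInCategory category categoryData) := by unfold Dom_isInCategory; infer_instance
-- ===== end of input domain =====

-- B inverts the traversal: one pass over categoryData collects the set of failed cut indices,
-- then a set-disjointness test against the category's required-index set (alternative, not faster).

-- ===== PORT A =====
-- categoryData[i]: Python raises IndexError when out of range; Pre_ excludes exactly those
-- executions, so the .getD false default is never observed inside the claim.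
def pvGetA (categoryData : List Bool) (i : Int) : Bool :=
  (PySem.List.pyGet? categoryData i).getD false

def isInCategory (category : Int) (categoryData : List Bool) : Bool :=
  if category = 0 then
    isInCategory 1 categoryData
  else if category = 1 then
    pvGetA categoryData 0 && pvGetA categoryData 2 && pvGetA categoryData 7
  else if category = 2 then
    pvGetA categoryData 0 && pvGetA categoryData 2 && pvGetA categoryData 4 && pvGetA categoryData 7
  else if category = 3 then
    pvGetA categoryData 1 && pvGetA categoryData 2 && pvGetA categoryData 4 && pvGetA categoryData 7
  else if category = 3 then  -- dead duplicate branch, kept from A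
    pvGetA categoryData 1 && pvGetA categoryData 2 && pvGetA categoryData 4 && pvGetA categoryData 5 && pvGetA categoryData 7
  else if category = 4 then
    pvGetA categoryData 1 && pvGetA categoryData 2 && pvGetA categoryData 4 && pvGetA categoryData 5 && pvGetA categoryData 6 && pvGetA categoryData 7
  else
    false
termination_by (if category = 0 then 1 else 0)
decreasing_by simp_all

-- ===== PORT B =====
-- the _REQUIRED dict of frozensets
def pvRequired : PySem.Dict Int (PySem.Set Int) :=
  (((((PySem.Dict.empty).insert 0 (PySem.Set.ofList [0, 2, 7])).insert 1 (PySem.Set.ofList [0, 2, 7])).insert 2 (PySem.Set.ofList [0, 2, 4, 7])).insert 3 (PySem.Set.ofList [1, 2, 4, 7])).insert 4 (PySem.Set.ofList [1, 2, 4, 5, 6, 7])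

-- failed = {i for i, passed in enumerate(categoryData) if not passed}
def pvFailed (categoryData : List Bool) : PySem.Set Int :=
  PySem.Set.ofList (((PySem.List.enumerate categoryData 0).filter (fun p => !p.2)).map (fun p => p.1))

def isInCategory_alt (category : Int) (categoryData : List Bool) : Bool :=
  match PySem.Dict.get? pvRequired category with
  | none => false
  | some req => PySem.Set.isdisjoint req (pvFailed categoryData)

-- ===== PRECONDITION & SPEC =====
-- required indices (as Nat) that category's and-chain reads, in order
def pvReqIdx (category : Int) : List Nat :=
  if category = 0 ∨ category = 1 then [0, 2, 7]
  else if category = 2 then [0, 2, 4, 7]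
  else if category = 3 then [1, 2, 4, 7]
  else if category = 4 then [1, 2, 4, 5, 6, 7]
  else []

-- A returns normally iff every required index is in range, or some in-range required index
-- holds false (the and-chain short-circuits before the out-of-range access); elsewhere A
-- raises IndexError and exactly those inputs are excluded.
def Pre_isInCategory (category : Int) (categoryData : List Bool) : Prop :=
  (∀ i ∈ pvReqIdx category, i < categoryData.length) ∨
  (∃ i ∈ pvReqIdx category, i < categoryData.length ∧ categoryData.getD i true = false)

instance (category : Int) (categoryData : List Bool) : Decidable (Pre_isInCategory category categoryData) := by
  unfold Pre_isInCategory; infer_instance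

def pvWitness_isInCategory : Int × List Bool :=
  (2, [true, false, true, true, true, true, true, true])

def Spec_isInCategory (category : Int) (categoryData : List Bool) (out : Bool) : Prop := out = isInCategory_alt category categoryData
instance (category : Int) (categoryData : List Bool) (out : Bool) : Decidable (Spec_isInCategory category categoryData out) := by unfold Spec_isInCategory; infer_instance

-- ===== CLAIM (what is proved, stated in full; the proofs are below) =====
def Claim_equal_isInCategory : Prop := ∀ (category : Int) (categoryData : List Bool), Dom_isInCategory category categoryData → Pre_isInCategory category categoryData → Spec_isInCategory category categoryData (isInCategory category categoryData)

-- ===== LEMMAS AND PROOFS =====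

-- membership in B's failed set ↔ an in-range index holding false
theorem mem_failed_iff (d : List Bool) (k : Nat) :
    ((k : Int) ∈ pvFailed d) ↔ (k < d.length ∧ d.getD k false = false) := by
  simp only [pvFailed, PySem.Set.mem_ofList, List.mem_map, List.mem_filter,
    PySem.List.mem_enumerate_iff]
  constructor
  · rintro ⟨⟨j, w⟩, ⟨⟨m, hm, hp⟩, hfalse⟩, hj⟩
    cases hp
    simp only at hj hfalse
    have hmk : m = k := by omega
    subst hmk
    refine ⟨hm, ?_⟩
    simp only [List.getD_eq_getElem?_getD, List.getElem?_eq_getElem hm, Option.getD_some]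
    simpa using hfalse
  · rintro ⟨hk, hv⟩
    refine ⟨((k : Int), d[k]), ⟨⟨k, hk, by simp⟩, ?_⟩, rfl⟩
    simp only [List.getD_eq_getElem?_getD, List.getElem?_eq_getElem hk, Option.getD_some] at hv
    simp [hv]

theorem all_congr' {α : Type} (l : List α) (p q : α → Bool) (h : ∀ x ∈ l, p x = q x) :
    l.all p = l.all q := by
  induction l with
  | nil => rfl
  | cons a t ih => simp_all

-- frozenset.isdisjoint as an `all` over the first set's elements
theorem disj_eq (s t : List Int) :
    PySem.Set.isdisjoint s t = s.all (fun x => !(t.contains x)) := by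
  cases hd : PySem.Set.isdisjoint s t
  · have hne : ¬ ∀ x ∈ s, x ∉ t := fun h => by
      rw [(PySem.Set.isdisjoint_iff s t).mpr h] at hd; cases hd
    rw [not_forall] at hne
    obtain ⟨x, hx⟩ := hne
    rw [not_forall] at hx
    obtain ⟨hxs, hxt⟩ := hx
    rw [not_not] at hxt
    exact (List.all_eq_false.mpr ⟨x, hxs, by simp [hxt]⟩).symm
  · have h := (PySem.Set.isdisjoint_iff s t).mp hd
    symm; rw [List.all_eq_true]
    intro x hx; simp [h x hx]

-- the bridge: A's and-chain over required indices = B's per-index "not failed" conjunction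
theorem chain_eq (d : List Bool) (r : List Nat)
    (hpre : (∀ i ∈ r, i < d.length) ∨ (∃ i ∈ r, i < d.length ∧ d.getD i true = false)) :
    r.all (fun i => pvGetA d (i : Int)) =
      r.all (fun i => !((pvFailed d).contains (i : Int))) := by
  rcases hpre with hall | ⟨i, hi, hlen, hfalse⟩
  · refine all_congr' _ _ _ (fun i hi => ?_)
    have hl := hall i hi
    have hget : pvGetA d (i : Int) = d[i] := by
      simp [pvGetA, PySem.List.pyGet?_natCast, List.getElem?_eq_getElem hl]
    have hmem : ((pvFailed d).contains (i : Int)) = decide (d[i] = false) := by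
      by_cases hv : d[i] = false
      · have : (i : Int) ∈ pvFailed d := (mem_failed_iff d i).mpr
          ⟨hl, by simp [List.getD_eq_getElem?_getD, List.getElem?_eq_getElem hl, hv]⟩
        simp [hv, this]
      · have hnm : ¬ ((i : Int) ∈ pvFailed d) := by
          rw [mem_failed_iff]
          rintro ⟨-, hgd⟩
          simp [List.getD_eq_getElem?_getD, List.getElem?_eq_getElem hl] at hgd
          exact hv hgd
        simp [hv, hnm]
    rw [hget, hmem]
    cases hb : d[i] <;> simp
  · have hval : d.getD i false = false := by
      simpa [List.getD_eq_getElem?_getD, List.getElem?_eq_getElem hlen] using hfalse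
    rw [List.all_eq_false.mpr ⟨i, hi, by
        simp only [pvGetA, PySem.List.pyGet?_natCast, Bool.not_eq_true]
        simpa [List.getD_eq_getElem?_getD] using hval⟩,
      List.all_eq_false.mpr ⟨i, hi, by
        simp [(mem_failed_iff d i).mpr ⟨hlen, hval⟩]⟩]

theorem case1 (d : List Bool) (hp : Pre_isInCategory 1 d) :
    isInCategory 1 d = isInCategory_alt 1 d := by
  have hch := chain_eq d [0, 2, 7] (by simpa [Pre_isInCategory, pvReqIdx] using hp)
  have hget : PySem.Dict.get? pvRequired 1 = some [0, 2, 7] := by decide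
  rw [isInCategory]
  simp only [isInCategory_alt, hget, disj_eq]
  simp only [List.all_cons, List.all_nil, Bool.and_true, Nat.cast_ofNat, Nat.cast_zero, ← Bool.and_assoc] at hch ⊢
  exact hch

theorem case0 (d : List Bool) (hp : Pre_isInCategory 0 d) :
    isInCategory 0 d = isInCategory_alt 0 d := by
  rw [isInCategory]
  have h1 := case1 d (by simpa [Pre_isInCategory, pvReqIdx] using hp)
  have hg0 : PySem.Dict.get? pvRequired 0 = some [0, 2, 7] := by decide
  have hg1 : PySem.Dict.get? pvRequired 1 = some [0, 2, 7] := by decide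
  simp only [isInCategory_alt, hg0, hg1] at h1 ⊢
  simpa using h1

theorem case2 (d : List Bool) (hp : Pre_isInCategory 2 d) :
    isInCategory 2 d = isInCategory_alt 2 d := by
  have hch := chain_eq d [0, 2, 4, 7] (by simpa [Pre_isInCategory, pvReqIdx] using hp)
  have hget : PySem.Dict.get? pvRequired 2 = some [0, 2, 4, 7] := by decide
  rw [isInCategory]
  simp only [isInCategory_alt, hget, disj_eq]
  simp only [List.all_cons, List.all_nil, Bool.and_true, Nat.cast_ofNat, Nat.cast_zero, ← Bool.and_assoc] at hch ⊢
  exact hch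

theorem case3 (d : List Bool) (hp : Pre_isInCategory 3 d) :
    isInCategory 3 d = isInCategory_alt 3 d := by
  have hch := chain_eq d [1, 2, 4, 7] (by simpa [Pre_isInCategory, pvReqIdx] using hp)
  have hget : PySem.Dict.get? pvRequired 3 = some [1, 2, 4, 7] := by decide
  rw [isInCategory]
  simp only [isInCategory_alt, hget, disj_eq]
  simp only [List.all_cons, List.all_nil, Bool.and_true, Nat.cast_ofNat, ← Bool.and_assoc] at hch ⊢
  exact hch

theorem case4 (d : List Bool) (hp : Pre_isInCategory 4 d) :
    isInCategory 4 d = isInCategory_alt 4 d := by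
  have hch := chain_eq d [1, 2, 4, 5, 6, 7] (by simpa [Pre_isInCategory, pvReqIdx] using hp)
  have hget : PySem.Dict.get? pvRequired 4 = some [1, 2, 4, 5, 6, 7] := by decide
  rw [isInCategory]
  simp only [isInCategory_alt, hget, disj_eq]
  simp only [List.all_cons, List.all_nil, Bool.and_true, Nat.cast_ofNat, ← Bool.and_assoc] at hch ⊢
  exact hch

-- ===== VERDICT (by name: the statement is the Claim_ definition above) =====
theorem isInCategory_spec : Claim_equal_isInCategory := by
  intro category categoryData _ hpre
  unfold Spec_isInCategory
  by_cases h0 : category = 0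
  · subst h0; exact case0 categoryData hpre
  by_cases h1 : category = 1
  · subst h1; exact case1 categoryData hpre
  by_cases h2 : category = 2
  · subst h2; exact case2 categoryData hpre
  by_cases h3 : category = 3
  · subst h3; exact case3 categoryData hpre
  by_cases h4 : category = 4
  · subst h4; exact case4 categoryData hpre
  rw [isInCategory]
  simp only [h0, h1, h2, h3, h4, if_false]
  have hget : PySem.Dict.get? pvRequired category = none := by
    rw [PySem.Dict.get?, List.find?_eq_none.mpr (by intro p hp; fin_cases hp <;> simp <;> omega), Option.map_none]
  simp [isInCategory_alt, hget]
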